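-- pv_equiv track=rewrite | github.com/rammeobu/Algorithm | 프로그래머스/1/340198. ［PCCE 기출문제］ 10번 ／ 공원/［PCCE 기출문제］ 10번 ／ 공원.py | solution
-- ===== SOURCE A (Python) =====
-- def solution(mets,park):
--     mets.sort()
--     answer=0
--     flag=0
--     for x in range(len(park)):
--         for y in range(len(park[x])):
--             if flag >= len(mets):
--                 return answer if answer != 0 else -1
--             if park[x][y]=="-1":
--                dx=x+mets[flag]-1
--                dy=y+mets[flag]-1
--                if dx<len(park) and dy<len(park[x]):
--                    temp_var=True
--                    for i in range(x,dx+1):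
--                        for j in range(y,dy+1):
--                            if not park[i][j] =="-1":
--                                temp_var=False
--                                break
--                        if not temp_var:
--                            break
--                    if temp_var:
--                        answer = mets[flag]
--                        flag+=1
--
--     if answer==0:
--         return -1
--     else:
--         return answer
-- ===== SOURCE B (Python) =====
-- def solution(mets, park):
--     mets.sort()
--     n = len(park)
--     W = 0
--     for r in park:
--         W = max(W, len(r))
--     # pre[i][j] = number of "-1" cells in rows 0..i-1, columns 0..j-1 (rows padded to width W)
--     pre = [[0] * (W + 1)]
--     for i in range(n):
--         row = [0]
--         for j in range(W):
--             e = 1 if j < len(park[i]) and park[i][j] == "-1" else 0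
--             row.append(row[j] + pre[i][j + 1] - pre[i][j] + e)
--         pre.append(row)
--
--     def fits(x, y, m):
--         if m <= 0:
--             return True
--         if x + m > n or y + m > len(park[x]):
--             return False
--         return pre[x + m][y + m] - pre[x][y + m] - pre[x + m][y] + pre[x][y] == m * m
--
--     answer = 0
--     flag = 0
--     for x in range(n):
--         for y in range(len(park[x])):
--             if flag >= len(mets):
--                 return answer if answer != 0 else -1
--             if park[x][y] == "-1" and fits(x, y, mets[flag]):
--                 answer = mets[flag]
--                 flag += 1
--     return answer if answer != 0 else -1
-- ===== Notes on version B (the rewrite author's own statement) =====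
-- stated objective: alternative
-- what changed: B precomputes one 2D prefix-sum table of empty cells (rows padded to the max width) and tests square emptiness by rectangle-count arithmetic, instead of A's nested per-square cell scan; the greedy row-major scan itself is unchanged.
-- outside the precondition, e.g. on solution([2], [['-1', '-1'], ['0']]): A returns -1, B returns -1
import Mathlib
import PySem

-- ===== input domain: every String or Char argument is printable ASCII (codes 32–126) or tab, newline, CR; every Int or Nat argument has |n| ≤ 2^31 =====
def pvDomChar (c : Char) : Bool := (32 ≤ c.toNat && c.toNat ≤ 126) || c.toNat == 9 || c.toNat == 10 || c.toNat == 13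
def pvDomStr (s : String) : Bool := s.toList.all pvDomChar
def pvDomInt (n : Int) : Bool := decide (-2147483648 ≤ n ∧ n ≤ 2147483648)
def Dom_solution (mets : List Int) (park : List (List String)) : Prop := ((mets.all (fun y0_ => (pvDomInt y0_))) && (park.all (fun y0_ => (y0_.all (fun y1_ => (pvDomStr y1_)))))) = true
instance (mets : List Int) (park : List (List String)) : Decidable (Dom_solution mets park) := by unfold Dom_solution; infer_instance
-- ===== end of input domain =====

-- B replaces A's nested per-square cell scan by a precomputed 2D prefix-sum table of empty-cell
-- counts (same greedy cell scan; A sorts `mets` in place and B does the same, so side effects match).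

-- ===== PORT A =====
-- park[i][j]; under Pre_solution every access both programs make is in range, so getD is exact
def pvCell (park : List (List String)) (i j : Nat) : String :=
  (park.getD i []).getD j ""

-- A's temp_var double loop with breaks: the computed value is "all cells in the square are '-1'";
-- pyRange elements are ≥ x ≥ 0 resp. ≥ y ≥ 0, so .toNat is exact
def pvCheckA (park : List (List String)) (x y : Nat) (dx dy : Int) : Bool :=
  (PySem.List.pyRange (x : Int) (dx + 1) 1).all (fun i =>
    (PySem.List.pyRange (y : Int) (dy + 1) 1).all (fun j =>
      pvCell park i.toNat j.toNat == "-1"))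

-- one iteration of A's cell loop; .error r = "A executed `return r`"
def pvStepA (ms : List Int) (park : List (List String)) (x y : Nat)
    (st : Except Int (Int × Nat)) : Except Int (Int × Nat) :=
  match st with
  | .error r => .error r
  | .ok (answer, flag) =>
    if ms.length ≤ flag then .error (if answer ≠ 0 then answer else -1)
    else if pvCell park x y == "-1" then
      let m := ms.getD flag 0
      let dx := (x : Int) + m - 1
      let dy := (y : Int) + m - 1
      if dx < (park.length : Int) ∧ dy < ((park.getD x []).length : Int) then
        if pvCheckA park x y dx dy then .ok (m, flag + 1) else .ok (answer, flag)
      else .ok (answer, flag)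
    else .ok (answer, flag)

def solution (mets : List Int) (park : List (List String)) : Int :=
  let ms := PySem.List.sorted mets id
  let res := (List.range park.length).foldl (fun st x =>
      (List.range (park.getD x []).length).foldl (fun st2 y => pvStepA ms park x y st2) st)
    (.ok (0, 0))
  match res with
  | .error r => r
  | .ok (answer, _) => if answer ≠ 0 then answer else -1

-- ===== PORT B =====
-- next prefix-sum row: row[j+1] = row[j] + prev[j+1] - prev[j] + e; pvCell's getD default ""
-- makes `pvCell park i j == "-1"` exactly Source B's `j < len(park[i]) and park[i][j] == "-1"`
def pvPreRow (park : List (List String)) (c : Nat) (prev : List Int) (i : Nat) : List Int :=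
  (List.range c).foldl (fun row j =>
    row ++ [row.getD j 0 + prev.getD (j + 1) 0 - prev.getD j 0 +
            (if pvCell park i j == "-1" then 1 else 0)]) [0]

-- pre[i][j] = number of "-1" cells in park[0:i] x [0:j] (rows padded to width c)
def pvPre (park : List (List String)) (n c : Nat) : List (List Int) :=
  (List.range n).foldl (fun pre i => pre ++ [pvPreRow park c (pre.getD i []) i])
    [List.replicate (c + 1) 0]

-- B's fits(x, y, m): rectangle-count emptiness test; x+m and y+m are ≥ 0 in the branch taken, so .toNat is exact
def pvFits (pre : List (List Int)) (n : Nat) (park : List (List String)) (x y : Nat) (m : Int) : Bool :=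
  if m ≤ 0 then true
  else if (n : Int) < (x : Int) + m ∨ (((park.getD x []).length : Int) < (y : Int) + m) then false
  else
    let dx := ((x : Int) + m).toNat
    let dy := ((y : Int) + m).toNat
    ((pre.getD dx []).getD dy 0 - (pre.getD x []).getD dy 0
      - (pre.getD dx []).getD y 0 + (pre.getD x []).getD y 0) == m * m

-- one iteration of B's cell loop
def pvStepB (ms : List Int) (park : List (List String)) (pre : List (List Int)) (n : Nat)
    (x y : Nat) (st : Except Int (Int × Nat)) : Except Int (Int × Nat) :=
  match st with
  | .error r => .error r
  | .ok (answer, flag) =>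
    if ms.length ≤ flag then .error (if answer ≠ 0 then answer else -1)
    else if pvCell park x y == "-1" && pvFits pre n park x y (ms.getD flag 0) then
      .ok (ms.getD flag 0, flag + 1)
    else .ok (answer, flag)

def solution_alt (mets : List Int) (park : List (List String)) : Int :=
  let ms := PySem.List.sorted mets id
  let n := park.length
  let W := park.foldl (fun acc r => max acc r.length) 0
  let pre := pvPre park n W
  let res := (List.range n).foldl (fun st x =>
      (List.range (park.getD x []).length).foldl (fun st2 y => pvStepB ms park pre n x y st2) st)
    (.ok (0, 0))
  match res with
  | .error r => r
  | .ok (answer, _) => if answer ≠ 0 then answer else -1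

-- ===== PRECONDITION & SPEC =====
-- Pre_ excludes inputs where some in-bounds mat square starting at an empty cell spans a shorter
-- row of a ragged park: there A's cell scan can run past that row's end and raise IndexError
-- (on some of these A still returns, when the scan hits a non-empty cell first).
def Pre_solution (mets : List Int) (park : List (List String)) : Prop :=
  ∀ x ∈ List.range park.length, ∀ y ∈ List.range (park.getD x []).length,
    (park.getD x []).getD y "" = "-1" →
    ∀ m ∈ mets, 2 ≤ m → (x : Int) + m ≤ (park.length : Int) →
      (y : Int) + m ≤ (((park.getD x []).length : Int)) →
      ∀ i ∈ List.range park.length, x < i → (i : Int) < (x : Int) + m →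
        (y : Int) + m ≤ (((park.getD i []).length : Int))
instance (mets : List Int) (park : List (List String)) : Decidable (Pre_solution mets park) := by
  unfold Pre_solution; infer_instance

def pvWitness_solution : List Int × List (List String) :=
  ([1, 2], [["-1", "-1"], ["-1", "0"]])

def Spec_solution (mets : List Int) (park : List (List String)) (out : Int) : Prop :=
  out = solution_alt mets park
instance (mets : List Int) (park : List (List String)) (out : Int) :
    Decidable (Spec_solution mets park out) := by unfold Spec_solution; infer_instance

-- ===== CLAIM (what is proved, stated in full; the proofs are below) =====
def Claim_equal_solution : Prop := ∀ (mets : List Int) (park : List (List String)),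
  Dom_solution mets park → Pre_solution mets park → Spec_solution mets park (solution mets park)

-- ===== LEMMAS AND PROOFS =====

-- number of "-1" cells in park[0:i] x [0:j]
def pvS (park : List (List String)) (i j : Nat) : Int :=
  ∑ p ∈ Finset.range i, ∑ q ∈ Finset.range j, (if pvCell park p q == "-1" then (1 : Int) else 0)

lemma pvS_zero (park : List (List String)) (j : Nat) : pvS park 0 j = 0 := by
  simp [pvS]

lemma pvS_zero_right (park : List (List String)) (i : Nat) : pvS park i 0 = 0 := by
  simp [pvS]

lemma pvS_succ_succ (park : List (List String)) (i j : Nat) :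
    pvS park (i + 1) (j + 1) =
      pvS park (i + 1) j + pvS park i (j + 1) - pvS park i j +
        (if pvCell park i j == "-1" then 1 else 0) := by
  simp only [pvS, Finset.sum_range_succ]
  ring

lemma pvPreRow_eq (park : List (List String)) (c : Nat) (i : Nat) (prev : List Int)
    (hprev : ∀ j, j ≤ c → prev.getD j 0 = pvS park i j) :
    pvPreRow park c prev i = (List.range (c + 1)).map (fun j => pvS park (i + 1) j) := by
  have key : ∀ m, m ≤ c →
      (List.range m).foldl (fun row j =>
        row ++ [row.getD j 0 + prev.getD (j + 1) 0 - prev.getD j 0 +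
          (if pvCell park i j == "-1" then 1 else 0)]) [0] =
      (List.range (m + 1)).map (fun j => pvS park (i + 1) j) := by
    intro m
    induction m with
    | zero => intro _; simp [pvS_zero_right]
    | succ m ih =>
      intro hm
      rw [List.range_succ, List.foldl_append]
      rw [ih (by omega)]
      simp only [List.foldl_cons, List.foldl_nil]
      rw [PySem.List.getD_map_range _ _ _ _ (by omega),
          hprev (m + 1) (by omega), hprev m (by omega)]
      rw [show (List.range (m + 1 + 1)) = List.range (m + 1) ++ [m + 1] from List.range_succ,
          List.map_append]
      simp [pvS_succ_succ]

  exact key c le_rfl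

lemma pvPre_eq (park : List (List String)) (n c : Nat) :
    pvPre park n c = (List.range (n + 1)).map (fun i => (List.range (c + 1)).map (fun j => pvS park i j)) := by
  have base : [List.replicate (c + 1) 0] =
      (List.range 1).map (fun i => (List.range (c + 1)).map (fun j => pvS park i j)) := by
    simp [pvS_zero, List.map_const']
  have key : ∀ m, (List.range m).foldl (fun pre i => pre ++ [pvPreRow park c (pre.getD i []) i])
        [List.replicate (c + 1) 0] =
      (List.range (m + 1)).map (fun i => (List.range (c + 1)).map (fun j => pvS park i j)) := by
    intro m
    induction m with
    | zero => simpa using base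
    | succ m ih =>
      rw [List.range_succ, List.foldl_append, ih]
      simp only [List.foldl_cons, List.foldl_nil]
      rw [PySem.List.getD_map_range _ _ _ _ (by omega)]
      rw [pvPreRow_eq park c m _ (fun j hj => PySem.List.getD_map_range _ _ _ _ (by omega))]
      rw [show (List.range (m + 1 + 1)) = List.range (m + 1) ++ [m + 1] from List.range_succ,
          List.map_append]
      simp
  exact key n

lemma pvG_eq (park : List (List String)) (n c a b : Nat) (ha : a ≤ n) (hb : b ≤ c) :
    ((pvPre park n c).getD a []).getD b 0 = pvS park a b := by
  rw [pvPre_eq]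
  rw [PySem.List.getD_map_range _ _ _ _ (by omega)]
  rw [PySem.List.getD_map_range _ _ _ _ (by omega)]

-- a 0/1 sum over a finset equals the card iff every element satisfies the predicate
lemma pv_sum_boole_eq_card {s : Finset Nat} {p : Nat → Prop} [DecidablePred p] :
    ((∑ a ∈ s, if p a then (1 : Int) else 0) = (s.card : Int)) ↔ ∀ a ∈ s, p a := by
  rw [Finset.sum_boole]
  constructor
  · intro h a ha
    have hcard : ({x ∈ s | p x} : Finset Nat).card = s.card := by exact_mod_cast h
    have : ({x ∈ s | p x} : Finset Nat) = s :=
      Finset.eq_of_subset_of_card_le (Finset.filter_subset _ _) (le_of_eq hcard.symm)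
    exact (Finset.filter_eq_self.mp this) a ha
  · intro h
    rw [Finset.filter_eq_self.mpr h]

-- the rectangle count equals M*M iff every cell of the square is empty
lemma pv_rect_iff (park : List (List String)) (x y M : Nat) :
    (pvS park (x + M) (y + M) - pvS park x (y + M) - pvS park (x + M) y + pvS park x y
      = (M : Int) * (M : Int)) ↔
    ∀ p ∈ Finset.Ico x (x + M), ∀ q ∈ Finset.Ico y (y + M), pvCell park p q == "-1" := by
  have h3 : ∀ p : Nat, (∑ q ∈ Finset.Ico y (y + M), (if pvCell park p q == "-1" then (1 : Int) else 0))
      = (∑ q ∈ Finset.range (y + M), (if pvCell park p q == "-1" then (1 : Int) else 0))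
        - (∑ q ∈ Finset.range y, (if pvCell park p q == "-1" then (1 : Int) else 0)) :=
    fun p => Finset.sum_Ico_eq_sub _ (Nat.le_add_right y M)
  have h1 := Finset.sum_Ico_eq_sub
    (fun p => ∑ q ∈ Finset.range (y + M), (if pvCell park p q == "-1" then (1 : Int) else 0))
    (Nat.le_add_right x M)
  have h2 := Finset.sum_Ico_eq_sub
    (fun p => ∑ q ∈ Finset.range y, (if pvCell park p q == "-1" then (1 : Int) else 0))
    (Nat.le_add_right x M)
  have key : pvS park (x + M) (y + M) - pvS park x (y + M) - pvS park (x + M) y + pvS park x y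
      = ∑ p ∈ Finset.Ico x (x + M), ∑ q ∈ Finset.Ico y (y + M),
          (if pvCell park p q == "-1" then (1 : Int) else 0) := by
    rw [Finset.sum_congr rfl (fun p _ => h3 p), Finset.sum_sub_distrib, h1, h2]
    simp only [pvS]
    ring
  rw [key]
  have houter : ∀ p ∈ Finset.Ico x (x + M),
      (∑ q ∈ Finset.Ico y (y + M), (if pvCell park p q == "-1" then (1 : Int) else 0)) ≤ (M : Int) := by
    intro p _
    calc (∑ q ∈ Finset.Ico y (y + M), (if pvCell park p q == "-1" then (1 : Int) else 0))
        ≤ ∑ _q ∈ Finset.Ico y (y + M), (1 : Int) :=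
          Finset.sum_le_sum (fun q _ => by split <;> norm_num)
      _ = (M : Int) := by simp [Nat.card_Ico]
  have hMM : (M : Int) * (M : Int) = ∑ _p ∈ Finset.Ico x (x + M), (M : Int) := by
    simp [Finset.sum_const, Nat.card_Ico]
  rw [hMM, Finset.sum_eq_sum_iff_of_le houter]
  have hinner : ∀ p : Nat,
      ((∑ q ∈ Finset.Ico y (y + M), (if pvCell park p q == "-1" then (1 : Int) else 0)) = (M : Int)) ↔
      ∀ q ∈ Finset.Ico y (y + M), pvCell park p q == "-1" := by
    intro p
    have := pv_sum_boole_eq_card (s := Finset.Ico y (y + M))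
      (p := fun q => (pvCell park p q == "-1") = true)
    simpa [Nat.card_Ico] using this
  exact forall₂_congr (fun p _ => hinner p)

lemma pvCheckA_iff (park : List (List String)) (x y M : Nat) :
    pvCheckA park x y ((x : Int) + M - 1) ((y : Int) + M - 1) = true ↔
    ∀ p ∈ Finset.Ico x (x + M), ∀ q ∈ Finset.Ico y (y + M), pvCell park p q == "-1" := by
  unfold pvCheckA
  rw [show (x : Int) + M - 1 + 1 = (x : Int) + M by ring,
      show (y : Int) + M - 1 + 1 = (y : Int) + M by ring]
  simp only [List.all_eq_true, PySem.List.mem_pyRange_one, Finset.mem_Ico]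
  constructor
  · intro h p hp q hq
    have := h (p : Int) (by omega) (q : Int) (by omega)
    simpa using this
  · intro h i hi j hj
    have := h i.toNat (by omega) j.toNat (by omega)
    exact this

-- the O(1) test equals A's bound check plus square scan
lemma pvFits_eq (park : List (List String)) (n W x y : Nat) (m : Int)
    (hn : n = park.length) (hx : x < n) (hy : y < (park.getD x []).length)
    (hW : (park.getD x []).length ≤ W) :
    pvFits (pvPre park n W) n park x y m =
      (decide ((x : Int) + m - 1 < (park.length : Int) ∧
               (y : Int) + m - 1 < ((park.getD x []).length : Int)) &&
       pvCheckA park x y ((x : Int) + m - 1) ((y : Int) + m - 1)) := by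
  by_cases hm : m ≤ 0
  · have hA : ((x : Int) + m - 1 < (park.length : Int) ∧
        (y : Int) + m - 1 < ((park.getD x []).length : Int)) := by
      constructor <;> omega
    have hC : pvCheckA park x y ((x : Int) + m - 1) ((y : Int) + m - 1) = true := by
      unfold pvCheckA
      rw [PySem.List.pyRange_one_eq_nil (by omega)]
      rfl
    unfold pvFits
    rw [if_pos hm, hC, Bool.and_true]
    exact (decide_eq_true hA).symm
  · by_cases hb : ((n : Int) < (x : Int) + m ∨ (((park.getD x []).length : Int) < (y : Int) + m))
    · have hA : ¬ ((x : Int) + m - 1 < (park.length : Int) ∧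
          (y : Int) + m - 1 < ((park.getD x []).length : Int)) := by omega
      unfold pvFits
      rw [if_neg hm, if_pos hb, decide_eq_false hA, Bool.false_and]
    · obtain ⟨M, rfl⟩ : ∃ M : Nat, m = (M : Int) := ⟨m.toNat, by omega⟩
      have hxM : x + M ≤ n := by omega
      have hyM : y + M ≤ W := by omega
      have hdx : ((x : Int) + (M : Int)).toNat = x + M := by omega
      have hdy : ((y : Int) + (M : Int)).toNat = y + M := by omega
      have hA : ((x : Int) + (M : Int) - 1 < (park.length : Int) ∧
          (y : Int) + (M : Int) - 1 < ((park.getD x []).length : Int)) := by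
        constructor <;> omega
      unfold pvFits
      rw [if_neg hm, if_neg hb]
      simp only [hdx, hdy]
      rw [pvG_eq park n W (x + M) (y + M) hxM hyM,
          pvG_eq park n W x (y + M) (by omega) hyM,
          pvG_eq park n W (x + M) y hxM (by omega),
          pvG_eq park n W x y (by omega) (by omega)]
      rw [Bool.eq_iff_iff]
      simp only [beq_iff_eq, Bool.and_eq_true, decide_eq_true_eq]
      rw [pv_rect_iff park x y M, pvCheckA_iff park x y M]
      rw [and_iff_right hA]

lemma pv_ite_and {α : Type} (P : Prop) [Decidable P] (b : Bool) (u v : α) :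
    (if P then (if b then u else v) else v) = (if (decide P && b) = true then u else v) := by
  by_cases hP : P <;> cases b <;> simp [hP]

lemma pvStep_eq (ms : List Int) (park : List (List String)) (n W x y : Nat)
    (hn : n = park.length) (hx : x < n) (hy : y < (park.getD x []).length)
    (hW : (park.getD x []).length ≤ W) (st : Except Int (Int × Nat)) :
    pvStepA ms park x y st = pvStepB ms park (pvPre park n W) n x y st := by
  cases st with
  | error r => rfl
  | ok p =>
    obtain ⟨answer, flag⟩ := p
    simp only [pvStepA, pvStepB]
    by_cases hf : ms.length ≤ flag
    · simp [hf]
    · simp only [if_neg hf]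
      by_cases hc : (pvCell park x y == "-1") = true
      · simp only [hc, if_true, Bool.true_and]
        rw [pvFits_eq park n W x y (ms.getD flag 0) hn hx hy hW]
        exact pv_ite_and _ _ _ _
      · simp [hc]

-- ===== VERDICT (by name: the statement is the Claim_ definition above) =====
theorem solution_spec : Claim_equal_solution := by
  intro mets park _hdom _hpre
  unfold Spec_solution
  simp only [solution, solution_alt]
  have hW : ∀ x, x < park.length →
      (park.getD x []).length ≤ park.foldl (fun acc r => max acc r.length) 0 := by
    intro x hx
    have hmem : park.getD x [] ∈ park := by
      rw [List.getD_eq_getElem _ _ hx]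
      exact List.getElem_mem _
    have hmem' : (park.getD x []).length ∈ park.map List.length :=
      List.mem_map_of_mem hmem
    have h := (PySem.List.le_foldl_max (park.map List.length) 0).2 _ hmem'
    rwa [List.foldl_map] at h
  have hfold : (List.range park.length).foldl (fun st x =>
      (List.range (park.getD x []).length).foldl
        (fun st2 y => pvStepA (PySem.List.sorted mets id) park x y st2) st)
      (Except.ok (0, 0)) =
    (List.range park.length).foldl (fun st x =>
      (List.range (park.getD x []).length).foldl
        (fun st2 y => pvStepB (PySem.List.sorted mets id) park
          (pvPre park park.length (park.foldl (fun acc r => max acc r.length) 0))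
          park.length x y st2) st)
      (Except.ok (0, 0)) := by
    apply PySem.List.foldl_congr_mem
    intro acc x hx
    rw [List.mem_range] at hx
    apply PySem.List.foldl_congr_mem
    intro acc2 y hy
    rw [List.mem_range] at hy
    exact pvStep_eq _ park park.length _ x y rfl hx hy (hW x hx) acc2
  rw [hfold]
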